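-- pv_equiv track=rewrite | github.com/TC960/Take2 | backend/keystroke_pd.py | _side_masks
-- ===== SOURCE A (Python) =====
-- LEFT_HAND_KEYS = set(list("`12345qwertasdfgzxcvb"))
--
-- RIGHT_HAND_KEYS = set(list("67890-=[]\\yuiophjklnm,.'/"))
--
-- def _side_masks(char_stream):
--     left = 0
--     right = 0
--     for k in char_stream:
--         if len(k) == 1:  # single character key
--             if k in LEFT_HAND_KEYS:
--                 left += 1
--             elif k in RIGHT_HAND_KEYS:
--                 right += 1
--     total = left + right
--     return left, right, total
-- ===== SOURCE B (Python) =====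
-- from collections import Counter
--
-- LEFT_HAND_KEYS = set(list("`12345qwertasdfgzxcvb"))
--
-- RIGHT_HAND_KEYS = set(list("67890-=[]\\yuiophjklnm,.'/"))
--
-- def _side_masks(char_stream):
--     counts = Counter(k for k in char_stream if len(k) == 1)
--     left = sum(counts[k] for k in LEFT_HAND_KEYS)
--     right = sum(counts[k] for k in RIGHT_HAND_KEYS)
--     return left, right, left + right
-- ===== Notes on version B (the rewrite author's own statement) =====
-- stated objective: idiomatic
-- what changed: Replaces the per-character branch-and-accumulate loop with a Counter frequency table built in one pass over the stream, then sums the counts over the two fixed hand-key sets.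
import Mathlib
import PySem

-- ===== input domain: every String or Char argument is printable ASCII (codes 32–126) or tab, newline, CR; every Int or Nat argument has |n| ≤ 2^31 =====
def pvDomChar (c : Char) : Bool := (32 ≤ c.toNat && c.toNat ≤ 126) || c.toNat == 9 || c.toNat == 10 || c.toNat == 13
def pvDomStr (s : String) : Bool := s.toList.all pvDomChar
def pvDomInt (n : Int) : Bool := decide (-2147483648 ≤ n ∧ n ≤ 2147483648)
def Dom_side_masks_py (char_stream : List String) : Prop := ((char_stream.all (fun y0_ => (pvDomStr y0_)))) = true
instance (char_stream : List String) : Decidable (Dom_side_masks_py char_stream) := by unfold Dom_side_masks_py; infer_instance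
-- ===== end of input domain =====

-- B builds a Counter of the single-character keys in one pass, then sums counts over the two fixed hand-key sets (idiomatic; same cost).

-- ===== PORT A =====
-- LEFT_HAND_KEYS = set(list("`12345qwertasdfgzxcvb"))  (distinct one-char strings)
def leftKeys : List String :=
  ["`", "1", "2", "3", "4", "5", "q", "w", "e", "r", "t", "a", "s", "d", "f", "g", "z", "x", "c", "v", "b"]
-- RIGHT_HAND_KEYS = set(list("67890-=[]\\yuiophjklnm,.'/"))
def rightKeys : List String :=
  ["6", "7", "8", "9", "0", "-", "=", "[", "]", "\\", "y", "u", "i", "o", "p", "h", "j", "k", "l", "n", "m", ",", ".", "'", "/"]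

def side_masks_py (char_stream : List String) : Int × Int × Int :=
  let p := char_stream.foldl (fun (p : Int × Int) k =>
    if PySem.Str.len k == 1 then
      if leftKeys.contains k then (p.1 + 1, p.2)
      else if rightKeys.contains k then (p.1, p.2 + 1)
      else p
    else p) (0, 0)
  (p.1, p.2, p.1 + p.2)

-- ===== PORT B =====
def side_masks_py_alt (char_stream : List String) : Int × Int × Int :=
  let counts := PySem.Dict.counter (char_stream.filter (fun k => PySem.Str.len k == 1))
  let left := leftKeys.foldl (fun a k => a + counts.getD k 0) 0
  let right := rightKeys.foldl (fun a k => a + counts.getD k 0) 0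
  (left, right, left + right)

-- ===== PRECONDITION & SPEC =====
def Spec_side_masks_py (char_stream : List String) (out : Int × Int × Int) : Prop := out = side_masks_py_alt char_stream
instance (char_stream : List String) (out : Int × Int × Int) : Decidable (Spec_side_masks_py char_stream out) := by unfold Spec_side_masks_py; infer_instance

-- ===== CLAIM (what is proved, stated in full; the proofs are below) =====
def Claim_equal_side_masks_py : Prop := ∀ (char_stream : List String), Dom_side_masks_py char_stream → Spec_side_masks_py char_stream (side_masks_py char_stream)

-- ===== LEMMAS AND PROOFS =====

-- sum of a 0/1 indicator over a list not containing x is 0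
theorem ind_sum_zero (K : List String) (x : String) (hx : x ∉ K) :
    (K.map (fun k => if k == x then (1 : Int) else 0)).sum = 0 := by
  induction K with
  | nil => rfl
  | cons k K ih =>
    simp only [List.mem_cons, not_or] at hx
    have hkx : (k == x) = false := beq_eq_false_iff_ne.mpr fun h => hx.1 h.symm
    rw [List.map_cons, List.sum_cons, hkx, if_neg Bool.false_ne_true, ih hx.2]
    norm_num

-- sum of the 0/1 indicator of x over a duplicate-free list = membership indicator
theorem ind_sum (K : List String) (hK : K.Nodup) (x : String) :
    (K.map (fun k => if k == x then (1 : Int) else 0)).sum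
      = if K.contains x then 1 else 0 := by
  induction K with
  | nil => rfl
  | cons k K ih =>
    rcases List.nodup_cons.mp hK with ⟨hk, hK'⟩
    by_cases h : k = x
    · subst h
      have hc : (k :: K).contains k = true := by simp
      rw [List.map_cons, List.sum_cons, beq_self_eq_true, if_pos rfl,
        ind_sum_zero K k hk, hc, if_pos rfl]
      norm_num
    · have hkx : (k == x) = false := beq_eq_false_iff_ne.mpr h
      have hxk : (x == k) = false := beq_eq_false_iff_ne.mpr fun hh => h hh.symm
      rw [List.map_cons, List.sum_cons, hkx, if_neg Bool.false_ne_true,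
        ih hK', List.contains_cons, hxk, Bool.false_or]
      norm_num

-- sum over a duplicate-free key list of a list's element counts = countP membership
theorem sum_counts (K : List String) (hK : K.Nodup) (l : List String) :
    (K.map (fun k => (l.count k : Int))).sum = (l.countP (fun x => K.contains x) : Int) := by
  induction l with
  | nil => simp
  | cons x l ih =>
    have hmap : K.map (fun k => ((x :: l).count k : Int))
        = K.map (fun k => (l.count k : Int) + if k == x then (1 : Int) else 0) := by
      apply List.map_congr_left
      intro k _
      rw [List.count_cons]
      by_cases h : k = x
      · subst h; simp
      · have h1 : (x == k) = false := beq_eq_false_iff_ne.mpr fun hh => h hh.symm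
        have h2 : (k == x) = false := beq_eq_false_iff_ne.mpr h
        rw [h1, h2]
        norm_num
    rw [hmap, List.sum_map_add, ih, ind_sum K hK x, List.countP_cons]
    cases hx : K.contains x
    · rw [if_neg Bool.false_ne_true, if_neg Bool.false_ne_true]
      norm_num
    · rw [if_pos rfl, if_pos rfl]
      push_cast
      ring

-- a right-hand key is never a left-hand key, so A's elif never masks a right count
theorem right_not_left (k : String) :
    (!leftKeys.contains k && rightKeys.contains k) = rightKeys.contains k := by
  cases h : rightKeys.contains k
  · exact Bool.and_false _
  · have hk : k ∈ rightKeys := by simpa using h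
    have hall : rightKeys.all (fun k => !leftKeys.contains k) = true := by decide
    have hnl := List.all_eq_true.mp hall k hk
    rw [Bool.not_eq_true'] at hnl
    rw [hnl]
    rfl

-- characterisation of A's loop
theorem loopA (cs : List String) (l r : Int) :
    cs.foldl (fun (p : Int × Int) k =>
      if PySem.Str.len k == 1 then
        if leftKeys.contains k then (p.1 + 1, p.2)
        else if rightKeys.contains k then (p.1, p.2 + 1)
        else p
      else p) (l, r)
    = (l + (cs.countP (fun k => (PySem.Str.len k == 1) && leftKeys.contains k) : Int),
       r + (cs.countP (fun k => (PySem.Str.len k == 1) && !leftKeys.contains k && rightKeys.contains k) : Int)) := by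
  induction cs generalizing l r with
  | nil => simp
  | cons k cs ih =>
    rw [List.foldl_cons, List.countP_cons, List.countP_cons]
    cases h1 : (PySem.Str.len k == 1)
    · rw [if_neg Bool.false_ne_true, ih]
      simp only [Bool.false_and, Bool.false_eq_true, if_false]
      norm_num
    · cases h2 : leftKeys.contains k
      · rw [if_pos rfl, if_neg Bool.false_ne_true]
        cases h3 : rightKeys.contains k
        · rw [if_neg Bool.false_ne_true, ih]
          simp only [Bool.true_and, Bool.not_false, Bool.and_false, Bool.false_eq_true, if_false]
          norm_num
        · rw [if_pos rfl, ih]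
          simp only [Bool.true_and, Bool.not_false, Bool.and_true, Bool.false_eq_true, if_false,
            Prod.mk.injEq]
          constructor <;> push_cast <;> ring
      · rw [if_pos rfl, if_pos rfl, ih]
        simp only [Bool.not_true, Bool.false_and, Bool.and_true, Bool.and_false,
          Bool.false_eq_true, if_false, Prod.mk.injEq]
        constructor <;> push_cast <;> ring

-- ===== VERDICT (by name: the statement is the Claim_ definition above) =====
theorem side_masks_py_spec : Claim_equal_side_masks_py := by
  intro cs _
  unfold Spec_side_masks_py side_masks_py side_masks_py_alt
  simp only [loopA, PySem.List.foldl_add, PySem.Dict.getD_counter]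
  rw [sum_counts leftKeys (by decide), sum_counts rightKeys (by decide),
    List.countP_filter, List.countP_filter]
  have hL : (fun x => leftKeys.contains x && (PySem.Str.len x == 1))
      = (fun k => (PySem.Str.len k == 1) && leftKeys.contains k) := by
    funext x; exact Bool.and_comm _ _
  have hR : (fun x => rightKeys.contains x && (PySem.Str.len x == 1))
      = (fun k => (PySem.Str.len k == 1) && !leftKeys.contains k && rightKeys.contains k) := by
    funext x
    have h := right_not_left x
    cases hA : (PySem.Str.len x == 1) <;> cases hB : leftKeys.contains x <;>
      cases hC : rightKeys.contains x <;> rw [hB, hC] at h <;>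
      first | rfl | exact absurd h (by decide)
  rw [hL, hR]
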